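-- pv_equiv track=rewrite | github.com/arni-007/Arni_RUGVED | OneDrive/Desktop/RUGVED/task1/hill_no.py | is_hill_number
-- ===== SOURCE A (Python) =====
-- def is_hill_number(n):
--     num_str = str(n)
--     if len(num_str) < 3:
--         return False
--
--     i = 0
--
--     while i < len(num_str) - 1 and num_str[i] < num_str[i + 1]:
--         i += 1
--
--     if i == 0 or i == len(num_str) - 1:
--         return False
--
--     while i < len(num_str) - 1 and num_str[i] > num_str[i + 1]:
--         i += 1
--
--     return i == len(num_str) - 1
-- ===== SOURCE B (Python) =====
-- def is_hill_number(n):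
--     s = str(n)
--     if len(s) < 3:
--         return False
--     p = s.index(max(s))
--     if p == 0 or p == len(s) - 1:
--         return False
--     left = s[:p + 1]
--     right = s[p:]
--     return all(a < b for a, b in zip(left, left[1:])) and \
--            all(a > b for a, b in zip(right, right[1:]))
-- ===== Notes on version B (the rewrite author's own statement) =====
-- stated objective: idiomatic
-- what changed: Replaces the two-pointer flip-detection walk by locate-the-peak-then-validate: find the index of the maximal character with str.index(max(s)) and check the two slices around it are strictly monotone with all/zip.
import Mathlib
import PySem

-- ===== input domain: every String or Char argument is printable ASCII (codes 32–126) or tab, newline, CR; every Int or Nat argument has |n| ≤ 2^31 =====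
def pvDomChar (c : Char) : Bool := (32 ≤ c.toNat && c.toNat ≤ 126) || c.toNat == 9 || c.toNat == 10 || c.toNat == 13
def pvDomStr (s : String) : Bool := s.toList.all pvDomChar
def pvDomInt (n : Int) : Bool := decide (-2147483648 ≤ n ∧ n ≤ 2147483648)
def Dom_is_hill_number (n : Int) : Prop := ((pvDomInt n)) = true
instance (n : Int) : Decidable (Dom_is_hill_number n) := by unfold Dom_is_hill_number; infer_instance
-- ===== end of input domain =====

-- B replaces A's two-pointer flip-detection walk by locate-the-peak-then-validate-two-slices (idiomatic; same cost).

-- ===== PORT A =====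
-- first while loop of A: advance i while the next character is strictly larger
def hillUp (cs : List Char) (i : Nat) : Nat :=
  if h : i < cs.length - 1 ∧ cs.getD i ' ' < cs.getD (i + 1) ' ' then
    hillUp cs (i + 1)
  else i
termination_by cs.length - i
decreasing_by obtain ⟨h1, -⟩ := h; omega

-- second while loop of A: advance i while the next character is strictly smaller
def hillDown (cs : List Char) (i : Nat) : Nat :=
  if h : i < cs.length - 1 ∧ cs.getD (i + 1) ' ' < cs.getD i ' ' then
    hillDown cs (i + 1)
  else i
termination_by cs.length - i
decreasing_by obtain ⟨h1, -⟩ := h; omega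

-- A's body on the character list of str(n) (indexing via getD: the loop guards keep every index in range)
def is_hill_core (cs : List Char) : Bool :=
  if cs.length < 3 then false
  else
    let i := hillUp cs 0
    if i = 0 ∨ i = cs.length - 1 then false
    else decide (hillDown cs i = cs.length - 1)

def is_hill_number (n : Int) : Bool :=
  is_hill_core (PySem.Int.toStr n).toList

-- ===== PORT B =====
-- B's body: p = s.index(max(s)); check the two slices around p are strictly monotone
def is_hill_core_alt (cs : List Char) : Bool :=
  if cs.length < 3 then false
  else
    match PySem.List.max? cs (fun c => c) with
    | none => false
    | some m =>
      match PySem.List.index? cs m with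
      | none => false
      | some p =>
        if p = 0 ∨ p = cs.length - 1 then false
        else
          let left := PySem.List.slice cs none (some ((p : Int) + 1))
          let right := PySem.List.slice cs (some (p : Int)) none
          ((left.zip (PySem.List.slice left (some 1) none)).all fun ab => decide (ab.1 < ab.2)) &&
          ((right.zip (PySem.List.slice right (some 1) none)).all fun ab => decide (ab.2 < ab.1))

def is_hill_number_alt (n : Int) : Bool :=
  is_hill_core_alt (PySem.Int.toStr n).toList

-- ===== PRECONDITION & SPEC =====
def Spec_is_hill_number (n : Int) (out : Bool) : Prop := out = is_hill_number_alt n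
instance (n : Int) (out : Bool) : Decidable (Spec_is_hill_number n out) := by unfold Spec_is_hill_number; infer_instance

-- ===== CLAIM (what is proved, stated in full; the proofs are below) =====
def Claim_equal_is_hill_number : Prop := ∀ (n : Int), Dom_is_hill_number n → Spec_is_hill_number n (is_hill_number n)

-- ===== LEMMAS AND PROOFS =====

-- the hill property over a character list: a strict rise to a peak p, then a strict fall
def HillB (cs : List Char) : Prop :=
  ∃ p, 0 < p ∧ p + 1 < cs.length ∧
    (∀ k, k < p → cs.getD k ' ' < cs.getD (k + 1) ' ') ∧
    (∀ k, p ≤ k → k + 1 < cs.length → cs.getD (k + 1) ' ' < cs.getD k ' ')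

theorem hillUp_spec (cs : List Char) (i : Nat) :
    i ≤ hillUp cs i ∧
    (∀ k, i ≤ k → k < hillUp cs i → cs.getD k ' ' < cs.getD (k + 1) ' ') ∧
    (hillUp cs i < cs.length - 1 → ¬ cs.getD (hillUp cs i) ' ' < cs.getD (hillUp cs i + 1) ' ') ∧
    (i ≤ cs.length - 1 → hillUp cs i ≤ cs.length - 1) := by
  fun_induction hillUp cs i with
  | case1 i h ih =>
    obtain ⟨hle, hmono, hstop, hbd⟩ := ih
    refine ⟨by omega, ?_, hstop, fun _ => hbd (by omega)⟩
    intro k hk1 hk2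
    rcases Nat.eq_or_lt_of_le hk1 with rfl | hlt
    · exact h.2
    · exact hmono k hlt hk2
  | case2 i h =>
    exact ⟨le_rfl, fun k hk1 hk2 => by omega, fun hlt hc => h ⟨hlt, hc⟩, fun h' => h'⟩

theorem hillUp_eq (cs : List Char) (i j : Nat) (hij : i ≤ j)
    (h1 : ∀ k, i ≤ k → k < j → k < cs.length - 1 ∧ cs.getD k ' ' < cs.getD (k + 1) ' ')
    (h2 : ¬ (j < cs.length - 1 ∧ cs.getD j ' ' < cs.getD (j + 1) ' ')) :
    hillUp cs i = j := by
  fun_induction hillUp cs i with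
  | case1 i h ih =>
    rcases Nat.eq_or_lt_of_le hij with rfl | hlt
    · exact absurd h h2
    · exact ih (by omega) (fun k hk1 hk2 => h1 k (by omega) hk2)
  | case2 i h =>
    rcases Nat.eq_or_lt_of_le hij with rfl | hlt
    · rfl
    · exact absurd (h1 i le_rfl hlt) h

theorem hillDown_spec (cs : List Char) (i : Nat) :
    i ≤ hillDown cs i ∧
    (∀ k, i ≤ k → k < hillDown cs i → cs.getD (k + 1) ' ' < cs.getD k ' ') ∧
    (i ≤ cs.length - 1 → hillDown cs i ≤ cs.length - 1) := by
  fun_induction hillDown cs i with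
  | case1 i h ih =>
    obtain ⟨hle, hmono, hbd⟩ := ih
    refine ⟨by omega, ?_, fun _ => hbd (by omega)⟩
    intro k hk1 hk2
    rcases Nat.eq_or_lt_of_le hk1 with rfl | hlt
    · exact h.2
    · exact hmono k hlt hk2
  | case2 i h =>
    exact ⟨le_rfl, fun k hk1 hk2 => by omega, fun h' => h'⟩

theorem hillDown_eq (cs : List Char) (i j : Nat) (hij : i ≤ j)
    (h1 : ∀ k, i ≤ k → k < j → k < cs.length - 1 ∧ cs.getD (k + 1) ' ' < cs.getD k ' ')
    (h2 : ¬ (j < cs.length - 1 ∧ cs.getD (j + 1) ' ' < cs.getD j ' ')) :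
    hillDown cs i = j := by
  fun_induction hillDown cs i with
  | case1 i h ih =>
    rcases Nat.eq_or_lt_of_le hij with rfl | hlt
    · exact absurd h h2
    · exact ih (by omega) (fun k hk1 hk2 => h1 k (by omega) hk2)
  | case2 i h =>
    rcases Nat.eq_or_lt_of_le hij with rfl | hlt
    · rfl
    · exact absurd (h1 i le_rfl hlt) h

theorem A_iff (cs : List Char) (hlen : 3 ≤ cs.length) :
    is_hill_core cs = true ↔ HillB cs := by
  unfold is_hill_core
  rw [if_neg (by omega)]
  obtain ⟨hle, hmono, hstop, hbd⟩ := hillUp_spec cs 0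
  constructor
  · intro htrue
    by_cases hc : hillUp cs 0 = 0 ∨ hillUp cs 0 = cs.length - 1
    · simp [hc] at htrue
    · rw [if_neg hc] at htrue
      have hdeq : hillDown cs (hillUp cs 0) = cs.length - 1 := by simpa using htrue
      obtain ⟨dle, dmono, dbd⟩ := hillDown_spec cs (hillUp cs 0)
      push Not at hc
      have hub : hillUp cs 0 ≤ cs.length - 1 := hbd (by omega)
      refine ⟨hillUp cs 0, by omega, by omega, ?_, ?_⟩
      · intro k hk; exact hmono k (by omega) hk
      · intro k hk1 hk2
        exact dmono k hk1 (by omega)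
  · rintro ⟨p, hp0, hpl, hinc, hdec⟩
    have hup : hillUp cs 0 = p := by
      apply hillUp_eq cs 0 p (by omega)
      · intro k _ hk; exact ⟨by omega, hinc k hk⟩
      · rintro ⟨h1, h2⟩
        exact absurd h2 (not_lt_of_gt (hdec p le_rfl (by omega)))
    rw [hup, if_neg (by omega)]
    have hdn : hillDown cs p = cs.length - 1 := by
      apply hillDown_eq cs p (cs.length - 1) (by omega)
      · intro k hk1 hk2; exact ⟨hk2, hdec k hk1 (by omega)⟩
      · rintro ⟨h1, -⟩; omega
    simp [hdn]

-- zip-with-tail all-check ↔ indexwise strict relation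
theorem zip_all_iff (R : Char → Char → Prop) [DecidableRel R] (l : List Char) :
    ((l.zip l.tail).all fun ab => decide (R ab.1 ab.2)) = true ↔
      ∀ i, i + 1 < l.length → R (l.getD i ' ') (l.getD (i + 1) ' ') := by
  induction l with
  | nil => simp
  | cons a t ih =>
    cases t with
    | nil => simp
    | cons b t' =>
      simp only [List.tail_cons] at ih ⊢
      simp only [List.zip_cons_cons, List.all_cons, Bool.and_eq_true, decide_eq_true_eq,
        List.length_cons]
      rw [ih]
      constructor
      · rintro ⟨hab, hrest⟩ i hi
        cases i with
        | zero => simpa using hab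
        | succ i => simpa using hrest i (by simp; omega)
      · intro h
        refine ⟨by simpa using h 0 (by omega), fun i hi => ?_⟩
        simpa using h (i + 1) (by simp at hi ⊢; omega)

theorem zip_all_lt_iff (l : List Char) :
    ((l.zip l.tail).all fun ab => decide (ab.1 < ab.2)) = true ↔
      ∀ i, i + 1 < l.length → l.getD i ' ' < l.getD (i + 1) ' ' :=
  zip_all_iff (· < ·) l

theorem zip_all_gt_iff (l : List Char) :
    ((l.zip l.tail).all fun ab => decide (ab.2 < ab.1)) = true ↔
      ∀ i, i + 1 < l.length → l.getD (i + 1) ' ' < l.getD i ' ' :=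
  zip_all_iff (fun a b => b < a) l

theorem getD_take (l : List Char) (m k : Nat) (d : Char) (h : k < m) :
    (l.take m).getD k d = l.getD k d := by
  simp only [List.getD_eq_getElem?_getD, List.getElem?_take]
  simp [h]

theorem getD_drop (l : List Char) (m k : Nat) (d : Char) :
    (l.drop m).getD k d = l.getD (m + k) d := by
  simp only [List.getD_eq_getElem?_getD, List.getElem?_drop]

-- strict increase on a range composes
theorem lt_of_incRange (cs : List Char) (b : Nat)
    (h : ∀ k, k < b → cs.getD k ' ' < cs.getD (k + 1) ' ') :
    ∀ i j, i < j → j ≤ b → cs.getD i ' ' < cs.getD j ' ' := by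
  intro i j
  induction j with
  | zero => omega
  | succ j ih =>
    intro hij hjb
    rcases Nat.eq_or_lt_of_le (Nat.le_of_lt_succ hij) with rfl | hlt
    · exact h i (by omega)
    · exact lt_trans (ih hlt (by omega)) (h j (by omega))

theorem lt_of_decRange (cs : List Char) (a : Nat)
    (h : ∀ k, a ≤ k → k + 1 < cs.length → cs.getD (k + 1) ' ' < cs.getD k ' ') :
    ∀ i j, a ≤ i → i < j → j < cs.length → cs.getD j ' ' < cs.getD i ' ' := by
  intro i j
  induction j with
  | zero => omega
  | succ j ih =>
    intro hai hij hjl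
    rcases Nat.eq_or_lt_of_le (Nat.le_of_lt_succ hij) with rfl | hlt
    · exact h i hai (by omega)
    · exact lt_trans (h j (by omega) (by omega)) (ih hai hlt (by omega))

-- on a hill, the peak is the strict maximum
theorem hillB_peak_max (cs : List Char) (p : Nat)
    (hinc : ∀ k, k < p → cs.getD k ' ' < cs.getD (k + 1) ' ')
    (hdec : ∀ k, p ≤ k → k + 1 < cs.length → cs.getD (k + 1) ' ' < cs.getD k ' ') :
    ∀ j, j < cs.length → j ≠ p → cs.getD j ' ' < cs.getD p ' ' := by
  intro j hj hne
  rcases Nat.lt_or_ge j p with hlt | hge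
  · exact lt_of_incRange cs p hinc j p hlt le_rfl
  · exact lt_of_decRange cs p hdec p j le_rfl (by omega) hj

-- on a hill, B's computed index of the maximum IS the peak
theorem hillB_index (cs : List Char) (m : Char) (p : Nat)
    (hmax : PySem.List.max? cs (fun c => c) = some m)
    (hidx : PySem.List.index? cs m = some p)
    (h : HillB cs) :
    0 < p ∧ p + 1 < cs.length ∧
      (∀ k, k < p → cs.getD k ' ' < cs.getD (k + 1) ' ') ∧
      (∀ k, p ≤ k → k + 1 < cs.length → cs.getD (k + 1) ' ' < cs.getD k ' ') := by
  obtain ⟨q, hq0, hql, hinc, hdec⟩ := h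
  have hqlen : q < cs.length := by omega
  have hpeak := hillB_peak_max cs q hinc hdec
  have hm : m = cs.getD q ' ' := by
    obtain ⟨j, hjlen, hjm⟩ := List.getElem_of_mem (PySem.List.max?_mem hmax)
    by_cases hjq : j = q
    · subst hjq; rw [← hjm, List.getD_eq_getElem cs ' ' hjlen]
    · exfalso
      have h1 : cs.getD j ' ' < cs.getD q ' ' := hpeak j hjlen hjq
      have h2 : cs.getD q ' ' ≤ m :=
        PySem.List.max?_isMax hmax (cs.getD q ' ')
          (by rw [List.getD_eq_getElem cs ' ' hqlen]; exact List.getElem_mem hqlen)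
      rw [List.getD_eq_getElem cs ' ' hjlen, hjm] at h1
      exact absurd (lt_of_le_of_lt h2 h1) (lt_irrefl _)
  have hq : PySem.List.index? cs m = some q := by
    rw [PySem.List.index?_eq_some_iff]
    refine ⟨cs.take q, cs.drop (q + 1), ?_, List.length_take_of_le (by omega), ?_⟩
    · conv_lhs => rw [← List.take_append_drop q cs]
      congr 1
      rw [hm, List.getD_eq_getElem cs ' ' hqlen]
      exact (List.getElem_cons_drop hqlen).symm
    · intro hmem
      obtain ⟨j, hj, hx⟩ := List.getElem_of_mem hmem
      rw [List.getElem_take] at hx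
      have hjq : j < q := by simp at hj; omega
      have hjlen : j < cs.length := by omega
      have := hpeak j hjlen (by omega)
      rw [List.getD_eq_getElem cs ' ' hjlen, hx, ← hm] at this
      exact absurd this (by rw [hm]; exact lt_irrefl _)
  rw [hq] at hidx
  obtain rfl : q = p := Option.some.inj hidx
  exact ⟨hq0, hql, hinc, hdec⟩

theorem B_iff (cs : List Char) (hlen : 3 ≤ cs.length) :
    is_hill_core_alt cs = true ↔ HillB cs := by
  unfold is_hill_core_alt
  rw [if_neg (by omega)]
  rcases hmax : PySem.List.max? cs (fun c => c) with _ | m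
  · rw [PySem.List.max?_eq_none_iff] at hmax
    subst hmax; simp at hlen
  · rcases hidx : PySem.List.index? cs m with _ | p
    · rw [PySem.List.index?_eq_none_iff] at hidx
      exact (False.elim (hidx (PySem.List.max?_mem hmax)))
    · obtain ⟨hplt, hpm, hfirst⟩ := PySem.List.getElem_of_index?_eq_some hidx
      have hcast : ((p : Int) + 1) = (((p + 1 : Nat)) : Int) := by push_cast; ring
      dsimp only
      rw [hidx]
      simp only [hcast, PySem.List.slice_to_natCast, PySem.List.slice_from_natCast,
        PySem.List.slice_from_one]
      have hl1 : (cs.take (p + 1)).length = p + 1 := List.length_take_of_le (by omega)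
      have hl2 : (cs.drop p).length = cs.length - p := List.length_drop
      split_ifs with hc
      · simp only [false_iff]
        intro h
        obtain ⟨hp0, hpl, -, -⟩ := hillB_index cs m p hmax hidx h
        omega
      · rw [Bool.and_eq_true, zip_all_lt_iff, zip_all_gt_iff]
        constructor
        · rintro ⟨hL, hR⟩
          refine ⟨p, by omega, by omega, ?_, ?_⟩
          · intro k hk
            have := hL k (by rw [hl1]; omega)
            rwa [getD_take cs (p + 1) k ' ' (by omega),
                 getD_take cs (p + 1) (k + 1) ' ' (by omega)] at this
          · intro k hk1 hk2
            have := hR (k - p) (by rw [hl2]; omega)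
            rw [getD_drop, getD_drop] at this
            have e1 : p + (k - p) = k := by omega
            have e2 : p + (k - p + 1) = k + 1 := by omega
            rwa [e1, e2] at this
        · intro h
          obtain ⟨hp0, hpl, hinc, hdec⟩ := hillB_index cs m p hmax hidx h
          refine ⟨fun i hi => ?_, fun i hi => ?_⟩
          · rw [hl1] at hi
            rw [getD_take cs (p + 1) i ' ' (by omega),
                getD_take cs (p + 1) (i + 1) ' ' (by omega)]
            exact hinc i (by omega)
          · rw [hl2] at hi
            rw [getD_drop, getD_drop]
            have e2 : p + (i + 1) = (p + i) + 1 := by omega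
            rw [e2]
            exact hdec (p + i) (by omega) (by omega)

theorem core_eq (cs : List Char) : is_hill_core cs = is_hill_core_alt cs := by
  rcases Nat.lt_or_ge cs.length 3 with hlen | hlen
  · unfold is_hill_core is_hill_core_alt
    rw [if_pos hlen, if_pos hlen]
  · rw [Bool.eq_iff_iff, A_iff cs hlen, B_iff cs hlen]

-- ===== VERDICT (by name: the statement is the Claim_ definition above) =====
theorem is_hill_number_spec : Claim_equal_is_hill_number := by
  intro n _
  show is_hill_number n = is_hill_number_alt n
  exact core_eq _
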